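-- pv_equiv track=rewrite | github.com/oli5679/advent-of-code | 2015/7.py | reallocation_cycle
-- ===== SOURCE A (Python) =====
-- def find_largest_index(blocks):
--     max_value = max(blocks)
--     max_index = blocks.index(max_value)
--     return max_index
--
-- def reallocation_cycle(blocks):
--     target = find_largest_index(blocks)
--     target_len = blocks[target]
--     blocks[target] = 0
--     for i in range(target_len):
--         add_index = (target + i + 1) % len(blocks)
--         blocks[add_index] += 1
--
--     return blocks
-- ===== SOURCE B (Python) =====
-- def reallocation_cycle(blocks):
--     n = len(blocks)
--     val = max(blocks)
--     target = blocks.index(val)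
--     q, r = divmod(max(val, 0), n)
--     out = [(0 if j == target else x) + q + (1 if (j - target - 1) % n < r else 0)
--            for j, x in enumerate(blocks)]
--     blocks[:] = out
--     return blocks
-- ===== Notes on version B (the rewrite author's own statement) =====
-- stated objective: faster
-- what changed: A zeroes the max block and then loops max-value times incrementing one cell per step; B computes each cell's final value in closed form with divmod (base = val//n to everyone, +1 to the first val%n positions after the max index) in a single comprehension.
-- outside the precondition, e.g. on reallocation_cycle([]): A raises ValueError, B raises ValueError
import Mathlib
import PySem

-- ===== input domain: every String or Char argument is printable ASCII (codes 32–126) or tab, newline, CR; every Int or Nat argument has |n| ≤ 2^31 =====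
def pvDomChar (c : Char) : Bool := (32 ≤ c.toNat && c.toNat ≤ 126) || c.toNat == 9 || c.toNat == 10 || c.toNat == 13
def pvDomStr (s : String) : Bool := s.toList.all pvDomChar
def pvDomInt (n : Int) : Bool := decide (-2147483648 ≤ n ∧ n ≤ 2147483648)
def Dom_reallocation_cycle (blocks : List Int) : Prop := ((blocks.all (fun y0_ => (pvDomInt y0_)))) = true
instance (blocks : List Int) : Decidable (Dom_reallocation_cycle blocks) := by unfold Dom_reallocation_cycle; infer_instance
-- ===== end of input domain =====

-- B replaces A's max-value-step increment loop by an O(n) closed form (divmod); A mutates its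
-- argument in place and so does B (blocks[:] = out); the equivalence proved here is about the
-- return value.

-- ===== PORT A =====
-- one body of A's for-loop: add_index = (target + i + 1) % len(blocks); blocks[add_index] += 1
-- (add_index is the Python mod of a positive divisor, hence nonnegative, so .toNat is exact)
def pvStepA (target : Nat) (bs : List Int) (i : Int) : List Int :=
  let add_index := PySem.Int.mod ((target : Int) + i + 1) (bs.length : Int)
  bs.set add_index.toNat (bs.getD add_index.toNat 0 + 1)

def reallocation_cycle (blocks : List Int) : List Int :=
  match PySem.List.max? blocks (fun y => y) with
  | none => blocks        -- max([]) raises ValueError: outside Pre_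
  | some max_value =>
    match PySem.List.index? blocks max_value with
    | none => blocks      -- unreachable: the max is a member
    | some target =>
      let target_len := blocks.getD target 0   -- target is in range, default never used
      let b1 := blocks.set target 0
      (PySem.List.pyRange 0 target_len 1).foldl (pvStepA target) b1

-- ===== PORT B =====
def reallocation_cycle_alt (blocks : List Int) : List Int :=
  match PySem.List.max? blocks (fun y => y) with
  | none => blocks        -- max([]) raises ValueError: outside Pre_
  | some val =>
    match PySem.List.index? blocks val with
    | none => blocks      -- unreachable: the max is a member
    | some target =>
      let n : Int := blocks.length
      let q := PySem.Int.floordiv (max val 0) n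
      let r := PySem.Int.mod (max val 0) n
      (PySem.List.enumerate blocks 0).map (fun p =>
        (if p.1 = (target : Int) then 0 else p.2) + q +
          (if PySem.Int.mod (p.1 - target - 1) n < r then 1 else 0))

-- ===== PRECONDITION & SPEC =====
-- Pre_ excludes only the empty list, on which A (and B) raise ValueError from max([]).
def Pre_reallocation_cycle (blocks : List Int) : Prop := blocks ≠ []
instance (blocks : List Int) : Decidable (Pre_reallocation_cycle blocks) := by
  unfold Pre_reallocation_cycle; infer_instance

def pvWitness_reallocation_cycle : List Int := [0, 2, 7, 0]

def Spec_reallocation_cycle (blocks : List Int) (out : List Int) : Prop := out = reallocation_cycle_alt blocks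
instance (blocks : List Int) (out : List Int) : Decidable (Spec_reallocation_cycle blocks out) := by unfold Spec_reallocation_cycle; infer_instance

-- ===== CLAIM (what is proved, stated in full; the proofs are below) =====
def Claim_equal_reallocation_cycle : Prop := ∀ (blocks : List Int), Dom_reallocation_cycle blocks → Pre_reallocation_cycle blocks → Spec_reallocation_cycle blocks (reallocation_cycle blocks)

-- ===== LEMMAS AND PROOFS =====

theorem pvStepA_length (t : Nat) (bs : List Int) (i : Int) :
    (pvStepA t bs i).length = bs.length := by
  simp [pvStepA]

theorem foldl_pvStepA_length (t : Nat) (l : List Int) (b : List Int) :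
    (l.foldl (pvStepA t) b).length = b.length := by
  induction l generalizing b with
  | nil => rfl
  | cons x xs ih => simp [List.foldl, ih, pvStepA_length]

theorem getD_set (bs : List Int) (a k : Nat) (x : Int) (hk : k < bs.length) :
    (bs.set a x).getD k 0 = if a = k then x else bs.getD k 0 := by
  by_cases h : a = k
  · subst h; simp [List.getD_eq_getElem?_getD, hk]
  · simp [List.getD_eq_getElem?_getD, List.getElem?_set, h]

-- the mod/div step identities (over Int ediv/emod, variable positive divisor)
theorem succ_emod (v n : Int) (hn : 0 < n) :
    (v + 1) % n = if v % n + 1 = n then 0 else v % n + 1 := by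
  have h := Int.mul_ediv_add_emod v n
  have hr0 := Int.emod_nonneg v (by omega : n ≠ 0)
  have hrn := Int.emod_lt_of_pos v hn
  have hv : v + 1 = (v % n + 1) + n * (v / n) := by omega
  rw [hv, Int.add_mul_emod_self_left]
  by_cases h1 : v % n + 1 = n
  · rw [h1, Int.emod_self]; simp
  · rw [Int.emod_eq_of_lt (by omega) (by omega)]; simp [h1]

theorem succ_ediv (v n : Int) (hn : 0 < n) :
    (v + 1) / n = if v % n + 1 = n then v / n + 1 else v / n := by
  have h := Int.mul_ediv_add_emod v n
  have hr0 := Int.emod_nonneg v (by omega : n ≠ 0)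
  have hrn := Int.emod_lt_of_pos v hn
  have hc : (v / n) * n = n * (v / n) := mul_comm _ _
  have hv : v + 1 = (v % n + 1) + (v / n) * n := by omega
  rw [hv, Int.add_mul_ediv_right _ _ (by omega : n ≠ 0)]
  by_cases h1 : v % n + 1 = n
  · rw [h1, Int.ediv_self (by omega)]; simp; omega
  · rw [Int.ediv_eq_zero_of_lt (by omega) (by omega)]; simp [h1]

-- hit characterisation: the index incremented at step v is k  ↔  k's cyclic offset equals v % n
theorem hit_iff (n t k : Nat) (v : Int) (hk : k < n) :
    ((t : Int) + v + 1) % (n : Int) = (k : Int) ↔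
      ((k : Int) - t - 1) % n = v % n := by
  have hkk : ((k : Int)) % (n : Int) = (k : Int) :=
    Int.emod_eq_of_lt (by positivity) (by exact_mod_cast hk)
  constructor
  · intro h
    have h0 : (((t : Int) + v + 1) - k) % n = 0 := by
      rw [Int.sub_emod, h, hkk, Int.sub_self, Int.zero_emod]
    have hd : (n : Int) ∣ ((t : Int) + v + 1) - k := Int.dvd_of_emod_eq_zero h0
    have hd2 : (n : Int) ∣ (((k : Int) - t - 1) - v) := by
      have : (((k : Int) - t - 1) - v) = -((((t : Int) + v + 1)) - k) := by ring
      rw [this]; exact hd.neg_right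
    rw [Int.emod_eq_emod_iff_emod_sub_eq_zero]
    exact Int.emod_eq_zero_of_dvd hd2
  · intro h
    have h0 : (((k : Int) - t - 1) - v) % n = 0 :=
      Int.emod_eq_emod_iff_emod_sub_eq_zero.mp h
    have hd : (n : Int) ∣ (((k : Int) - t - 1) - v) := Int.dvd_of_emod_eq_zero h0
    have hd2 : (n : Int) ∣ (((t : Int) + v + 1) - k) := by
      have : (((t : Int) + v + 1) - k) = -((((k : Int) - t - 1)) - v) := by ring
      rw [this]; exact hd.neg_right
    have := Int.emod_eq_emod_iff_emod_sub_eq_zero.mpr (Int.emod_eq_zero_of_dvd hd2)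
    rw [this, hkk]

-- the loop characterisation: after v cyclic increments starting after t, cell k holds
-- b[k] + v/n + (1 if (k - t - 1) % n < v % n)
theorem loop_char (n t : Nat) (hn : 0 < n) (v : Nat) :
    ∀ (b : List Int), b.length = n → ∀ k : Nat, k < n →
      (((PySem.List.pyRange 0 (v : Int) 1).foldl (pvStepA t) b).getD k 0)
        = b.getD k 0 + (v : Int) / (n : Int) +
          (if ((k : Int) - t - 1) % (n : Int) < (v : Int) % (n : Int) then 1 else 0) := by
  have hn0 : ((n : Int)) ≠ 0 := by exact_mod_cast Nat.pos_iff_ne_zero.mp hn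
  have hnI : (0 : Int) < (n : Int) := by exact_mod_cast hn
  induction v with
  | zero =>
    intro b hb k hk
    have ho := Int.emod_nonneg ((k : Int) - t - 1) hn0
    simp [PySem.List.pyRange_one_eq_nil (by omega : (0:Int) ≤ 0)]
    omega
  | succ v ih =>
    intro b hb k hk
    have hcast : ((v + 1 : Nat) : Int) = (v : Int) + 1 := by push_cast; ring
    rw [hcast, PySem.List.pyRange_one_succ_right (by positivity), List.foldl_append]
    set F := (PySem.List.pyRange 0 (v : Int) 1).foldl (pvStepA t) b with hF
    have hFlen : F.length = n := by rw [hF, foldl_pvStepA_length, hb]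
    simp only [List.foldl]
    -- unfold one step
    have hr0 := Int.emod_nonneg ((t : Int) + v + 1) hn0
    have hrn := Int.emod_lt_of_pos ((t : Int) + v + 1) hnI
    have hmod : PySem.Int.mod ((t : Int) + v + 1) (F.length : Int)
        = ((t : Int) + v + 1) % (n : Int) := by
      rw [hFlen]; exact PySem.Int.mod_eq_emod_of_pos hnI
    set a : Int := ((t : Int) + v + 1) % (n : Int) with ha
    have haNat : ((a.toNat : Int)) = a := Int.toNat_of_nonneg hr0
    have hstep : pvStepA t F (v : Int)
        = F.set a.toNat (F.getD a.toNat 0 + 1) := by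
      simp only [pvStepA, hmod]
    rw [hstep, getD_set _ _ _ _ (by omega : k < F.length)]
    have hvr0 := Int.emod_nonneg (v : Int) hn0
    have hvrn := Int.emod_lt_of_pos (v : Int) hnI
    have ho0 := Int.emod_nonneg ((k : Int) - t - 1) hn0
    have hon := Int.emod_lt_of_pos ((k : Int) - t - 1) hnI
    rw [succ_emod _ _ hnI, succ_ediv _ _ hnI]
    have ihk := ih b hb k hk
    rw [← hF] at ihk
    by_cases hhit : a.toNat = k
    · -- incremented cell
      have hak : a = (k : Int) := by omega
      have heq : ((k : Int) - t - 1) % n = (v : Int) % n :=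
        (hit_iff n t k (v : Int) hk).mp (by rw [← ha, hak])
      rw [if_pos hhit, hhit, ihk, heq]
      by_cases hend : (v : Int) % n + 1 = n <;> simp [hend] <;> omega
    · -- untouched cell
      have hak : a ≠ (k : Int) := by omega
      have hne : ((k : Int) - t - 1) % n ≠ (v : Int) % n := by
        intro h
        exact hak ((hit_iff n t k (v : Int) hk).mpr h)
      rw [if_neg hhit, ihk]
      by_cases hend : (v : Int) % n + 1 = n <;> simp [hend] <;> omega

-- ===== VERDICT (by name: the statement is the Claim_ definition above) =====
theorem reallocation_cycle_spec : Claim_equal_reallocation_cycle := by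
  intro blocks _ hpre
  unfold Spec_reallocation_cycle reallocation_cycle reallocation_cycle_alt
  have hne : blocks ≠ [] := hpre
  obtain ⟨val, hval⟩ : ∃ v, PySem.List.max? blocks (fun y => y) = some v := by
    cases h : PySem.List.max? blocks (fun y => y) with
    | none => exact absurd ((PySem.List.max?_eq_none_iff _ _).mp h) hne
    | some v => exact ⟨v, rfl⟩
  have hmem : val ∈ blocks := PySem.List.max?_mem hval
  obtain ⟨t, hidx⟩ : ∃ t, PySem.List.index? blocks val = some t := by
    cases h : PySem.List.index? blocks val with
    | none => exact absurd hmem ((PySem.List.index?_eq_none_iff _ _).mp h)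
    | some t => exact ⟨t, rfl⟩
  obtain ⟨ht, hbt, -⟩ := PySem.List.getElem_of_index?_eq_some hidx
  simp only [hval, hidx]
  set n := blocks.length with hnn
  have hn : 0 < n := by cases blocks with | nil => exact absurd rfl hne | cons x xs => simp [hnn]
  have hn0 : ((n : Int)) ≠ 0 := by exact_mod_cast Nat.pos_iff_ne_zero.mp hn
  have hnI : (0 : Int) < (n : Int) := by exact_mod_cast hn
  -- A's target_len is val
  have hlen : blocks.getD t 0 = val := by rw [List.getD_eq_getElem _ _ ht, hbt]
  -- the loop runs max(val,0) = (val.toNat) steps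
  have hmaxv : max val 0 = ((val.toNat : Int)) := (Int.toNat_eq_max val).symm
  have hrange : PySem.List.pyRange 0 val 1 = PySem.List.pyRange 0 ((val.toNat : Nat) : Int) 1 := by
    by_cases h0 : 0 ≤ val
    · rw [Int.toNat_of_nonneg h0]
    · rw [PySem.List.pyRange_one_eq_nil (by omega),
        PySem.List.pyRange_one_eq_nil (by omega)]
  set v : Nat := val.toNat with hv
  -- rewrite B into a map over List.range n
  have hB : (PySem.List.enumerate blocks 0).map (fun p =>
        (if p.1 = (t : Int) then 0 else p.2) + PySem.Int.floordiv (max val 0) (n : Int) +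
          (if PySem.Int.mod (p.1 - t - 1) (n : Int) < PySem.Int.mod (max val 0) (n : Int) then 1 else 0))
      = (List.range n).map (fun k =>
        (if ((k : Nat) : Int) = (t : Int) then 0 else PySem.List.pyGetD blocks (k : Int) 0) + (v : Int) / (n : Int) +
          (if (((k : Nat) : Int) - t - 1) % (n : Int) < (v : Int) % (n : Int) then 1 else 0)) := by
    rw [PySem.List.enumerate_eq_map_pyRange blocks 0, List.map_map,
      PySem.List.pyRange_one 0 (PySem.List.len blocks), List.map_map]
    have : (PySem.List.len blocks - 0).toNat = n := by simp [PySem.List.len_eq, hnn]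
    rw [this]
    apply List.map_congr_left
    intro k _
    simp only [Function.comp, hmaxv,
      PySem.Int.floordiv_eq_ediv_of_pos hnI, PySem.Int.mod_eq_emod_of_pos hnI,
      zero_add]
  rw [hB]
  -- both sides have length n; compare elementwise
  apply List.ext_getElem
  · rw [hlen, hrange, foldl_pvStepA_length]
    simp [hnn]
  · intro k h1 h2
    have hk : k < n := by
      rw [hlen, hrange, foldl_pvStepA_length] at h1; simpa [hnn] using h1
    have hb1 : (blocks.set t 0).length = n := by simp [hnn]
    have hloop := loop_char n t hn v (blocks.set t 0) hb1 k hk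
    rw [← List.getD_eq_getElem _ 0, ← List.getD_eq_getElem _ 0, hlen, hrange, hloop,
      List.getD_eq_getElem _ 0 h2, List.getElem_map, List.getElem_range,
      getD_set _ _ _ _ (by omega : k < blocks.length)]
    have hget : PySem.List.pyGetD blocks ((k : Nat) : Int) 0 = blocks.getD k 0 := by
      rw [PySem.List.pyGetD_natCast, List.getD_eq_getElem?_getD]
    rw [hget]
    have htk : ((k : Nat) : Int) = (t : Int) ↔ t = k := by omega
    by_cases h : t = k <;> simp [h, htk]
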